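-- pv_equiv track=rewrite | github.com/navima/szkript | zh1/Nev_NEPTUN/feladat2/feladat2.py | brace_counter
-- ===== SOURCE A (Python) =====
-- def brace_counter(s):
-- 	counter = 0
-- 	max_counter = 0
-- 	min_counter = 0
-- 	counter_vals = {0: 1}
-- 	for c in s:
-- 		if c == "(":
-- 			counter += 1
-- 		else:
-- 			counter -= 1
-- 		if counter > max_counter:
-- 			max_counter = counter
-- 		if counter < min_counter:
-- 			min_counter = counter
-- 		counter_vals[counter] = counter_vals.get(counter, 0) + 1
-- 	return (counter, max_counter, min_counter, counter_vals)
-- ===== SOURCE B (Python) =====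
-- def brace_counter(s):
--     bal = 0
--     prefix = [0]
--     for c in s:
--         bal += 1 if c == "(" else -1
--         prefix.append(bal)
--     counts = {}
--     for v in prefix:
--         counts[v] = counts.get(v, 0) + 1
--     return (bal, max(prefix), min(prefix), counts)
-- ===== Notes on version B (the rewrite author's own statement) =====
-- stated objective: alternative
-- what changed: A fuses balance, max, min and the frequency dict into one loop with four accumulators; B first materializes the running-balance prefix list (seeded with 0) and then derives the four results by separate reductions (last balance, max(), min(), a counting pass).
import Mathlib
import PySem

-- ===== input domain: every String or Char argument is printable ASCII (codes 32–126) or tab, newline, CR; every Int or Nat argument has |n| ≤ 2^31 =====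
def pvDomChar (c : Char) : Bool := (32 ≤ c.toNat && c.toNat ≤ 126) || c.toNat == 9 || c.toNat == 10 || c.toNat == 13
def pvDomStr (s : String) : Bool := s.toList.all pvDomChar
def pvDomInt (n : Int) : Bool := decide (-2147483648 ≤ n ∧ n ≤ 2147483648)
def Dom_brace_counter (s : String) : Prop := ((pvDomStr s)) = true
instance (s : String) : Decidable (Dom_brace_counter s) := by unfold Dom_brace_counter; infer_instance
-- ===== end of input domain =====

-- B replaces A's fused four-accumulator loop by building the running-balance prefix list
-- first and then reducing it four separate ways (alternative decomposition, same cost).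

-- ===== PORT A =====
-- loop body of A's single fused pass (state: counter, max_counter, min_counter, counter_vals)
def pvStepA (st : Int × Int × Int × PySem.Dict Int Int) (c : Char) :
    Int × Int × Int × PySem.Dict Int Int :=
  let counter := if c = '(' then st.1 + 1 else st.1 - 1
  let mx := if counter > st.2.1 then counter else st.2.1
  let mn := if counter < st.2.2.1 then counter else st.2.2.1
  (counter, mx, mn, st.2.2.2.insert counter (st.2.2.2.getD counter 0 + 1))

def brace_counter (s : String) : Int × Int × Int × (List (Int × Int)) :=
  let st := s.toList.foldl pvStepA (0, 0, 0, (PySem.Dict.empty).insert 0 1)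
  (st.1, st.2.1, st.2.2.1, st.2.2.2.items)

-- ===== PORT B =====
-- first loop of B: append the running balance to the prefix list (state: prefix, bal)
def pvStepB (pb : List Int × Int) (c : Char) : List Int × Int :=
  let bal := pb.2 + (if c = '(' then 1 else -1)
  (pb.1 ++ [bal], bal)

def brace_counter_alt (s : String) : Int × Int × Int × (List (Int × Int)) :=
  let pb := s.toList.foldl pvStepB ([0], 0)
  let pref := pb.1
  -- prefix is nonempty (it starts as [0]), so Python's max/min never raise; .getD 0 is unreachable
  let counts := pref.foldl (fun (d : PySem.Dict Int Int) v => d.insert v (d.getD v 0 + 1)) PySem.Dict.empty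
  (pb.2, (PySem.List.max? pref (fun x => x)).getD 0,
   (PySem.List.min? pref (fun x => x)).getD 0, counts.items)

-- ===== PRECONDITION & SPEC =====
def Spec_brace_counter (s : String) (out : Int × Int × Int × (List (Int × Int))) : Prop := out = brace_counter_alt s
instance (s : String) (out : Int × Int × Int × (List (Int × Int))) : Decidable (Spec_brace_counter s out) := by unfold Spec_brace_counter; infer_instance

-- ===== CLAIM (what is proved, stated in full; the proofs are below) =====
def Claim_equal_brace_counter : Prop := ∀ (s : String), Dom_brace_counter s → Spec_brace_counter s (brace_counter s)

-- ===== LEMMAS AND PROOFS =====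

-- the running-balance tail (all balances after consuming each char) and the final balance
def pvAcc : List Char → Int → List Int
  | [], _ => []
  | c :: r, a => (a + (if c = '(' then 1 else -1)) :: pvAcc r (a + (if c = '(' then 1 else -1))

def pvLast : List Char → Int → Int
  | [], a => a
  | c :: r, a => pvLast r (a + (if c = '(' then 1 else -1))

theorem pvA_loop (cs : List Char) (a mx mn : Int) (d : PySem.Dict Int Int) :
    cs.foldl pvStepA (a, mx, mn, d) =
      (pvLast cs a, (pvAcc cs a).foldl max mx, (pvAcc cs a).foldl min mn,
       (pvAcc cs a).foldl (fun d v => d.insert v (d.getD v 0 + 1)) d) := by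
  induction cs generalizing a mx mn d with
  | nil => simp [pvAcc, pvLast]
  | cons c r ih =>
      by_cases hc : c = '('
      · have hmx : (if a + 1 > mx then a + 1 else mx) = max mx (a + 1) := by
          rw [max_def]; split_ifs <;> omega
        have hmn : (if a + 1 < mn then a + 1 else mn) = min mn (a + 1) := by
          rw [min_def]; split_ifs <;> omega
        simp only [List.foldl_cons, pvAcc, pvLast, pvStepA, hc, if_pos, hmx, hmn, ih]
      · have hmx : (if a + -1 > mx then a + -1 else mx) = max mx (a + -1) := by
          rw [max_def]; split_ifs <;> omega
        have hmn : (if a + -1 < mn then a + -1 else mn) = min mn (a + -1) := by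
          rw [min_def]; split_ifs <;> omega
        have ha : a - 1 = a + -1 := by ring
        simp only [List.foldl_cons, pvAcc, pvLast, pvStepA, hc, ite_false, ha, hmx, hmn, ih]

theorem pvB_loop (cs : List Char) (p : List Int) (a : Int) :
    cs.foldl pvStepB (p, a) = (p ++ pvAcc cs a, pvLast cs a) := by
  induction cs generalizing p a with
  | nil => simp [pvAcc, pvLast]
  | cons c r ih => simp [pvStepB, pvAcc, pvLast, ih]

-- ===== VERDICT (by name: the statement is the Claim_ definition above) =====
theorem brace_counter_spec : Claim_equal_brace_counter := by
  intro s _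
  unfold Spec_brace_counter brace_counter brace_counter_alt
  rw [pvA_loop, pvB_loop]
  simp only [List.singleton_append, PySem.List.max?_id_cons, PySem.List.min?_id_cons,
    Option.getD_some, List.foldl_cons]
  rfl
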